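-- pv_equiv track=rewrite | github.com/xTronzZ/FormulaSPIN | formula_simulator.py | _balance_delimiters
-- ===== SOURCE A (Python) =====
-- from typing import Any, Dict, List, Optional, Sequence, Tuple
--
-- def _balance_delimiters(text: str) -> str:
--     result: List[str] = []
--     paren_depth = 0
--     brace_depth = 0
--     in_string = False
--
--     for char in text:
--         if char == '"':
--             in_string = not in_string
--             result.append(char)
--             continue
--
--         if not in_string:
--             if char == '(':
--                 paren_depth += 1
--             elif char == ')':
--                 if paren_depth == 0:
--                     continue
--                 paren_depth -= 1
--             elif char == '{':
--                 brace_depth += 1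
--             elif char == '}':
--                 if brace_depth == 0:
--                     continue
--                 brace_depth -= 1
--
--         result.append(char)
--
--     if paren_depth > 0:
--         result.extend(')' * paren_depth)
--     if brace_depth > 0:
--         result.extend('}' * brace_depth)
--
--     return ''.join(result)
-- ===== SOURCE B (Python) =====
-- def _balance_delimiters(text: str) -> str:
--     segs = text.split('"')
--     p = 0
--     b = 0
--     parts = []
--     i = 0
--     while i < len(segs):
--         buf = []
--         for ch in segs[i]:
--             if ch == '(':
--                 p += 1
--             elif ch == ')':
--                 if p == 0:
--                     continue
--                 p -= 1
--             elif ch == '{':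
--                 b += 1
--             elif ch == '}':
--                 if b == 0:
--                     continue
--                 b -= 1
--             buf.append(ch)
--         parts.append(''.join(buf))
--         if i + 1 < len(segs):
--             parts.append(segs[i + 1])
--         i += 2
--     return '"'.join(parts) + ')' * p + '}' * b
-- ===== Notes on version B (the rewrite author's own statement) =====
-- stated objective: alternative
-- what changed: Replaces A's single pass with an in_string flag by splitting the text on the double-quote character into segments, threading global paren/brace depths through the even (outside-quote) segments only, copying odd segments verbatim, and rejoining before appending the missing closers.
import Mathlib
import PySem

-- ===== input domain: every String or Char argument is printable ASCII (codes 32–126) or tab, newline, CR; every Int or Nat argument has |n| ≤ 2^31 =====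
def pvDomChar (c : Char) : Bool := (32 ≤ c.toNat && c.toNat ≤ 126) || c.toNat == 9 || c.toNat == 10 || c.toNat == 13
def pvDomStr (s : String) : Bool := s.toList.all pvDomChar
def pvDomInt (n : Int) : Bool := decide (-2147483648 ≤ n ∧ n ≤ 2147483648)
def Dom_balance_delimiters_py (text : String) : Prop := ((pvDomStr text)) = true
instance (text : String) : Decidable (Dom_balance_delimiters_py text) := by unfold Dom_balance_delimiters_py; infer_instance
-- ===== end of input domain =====

-- B re-decomposes A's single flagged pass as split-on-double-quote / process even segments with global depths / rejoin; objective: alternative decomposition, same cost.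

-- ===== PORT A =====
-- one step of A's for-loop; state = (result, paren_depth, brace_depth, in_string)
def stepA (st : List Char × Int × Int × Bool) (c : Char) : List Char × Int × Int × Bool :=
  let (res, p, b, ins) := st
  if c = '"' then (res ++ [c], p, b, !ins)
  else if !ins then
    if c = '(' then (res ++ [c], p + 1, b, ins)
    else if c = ')' then (if p = 0 then (res, p, b, ins) else (res ++ [c], p - 1, b, ins))
    else if c = '{' then (res ++ [c], p, b + 1, ins)
    else if c = '}' then (if b = 0 then (res, p, b, ins) else (res ++ [c], p, b - 1, ins))
    else (res ++ [c], p, b, ins)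
  else (res ++ [c], p, b, ins)

def balance_delimiters_py (text : String) : String :=
  let st := text.toList.foldl stepA ([], 0, 0, false)
  String.mk (st.1
    ++ (if st.2.1 > 0 then List.replicate st.2.1.toNat ')' else [])
    ++ (if st.2.2.1 > 0 then List.replicate st.2.2.1.toNat '}' else []))

-- ===== PORT B =====
-- text.split('"') at the character level
def splitQ : List Char → List (List Char)
  | [] => [[]]
  | c :: cs =>
    if c = '"' then [] :: splitQ cs
    else
      match splitQ cs with
      | [] => [[c]]
      | s :: ss => (c :: s) :: ss

-- B's inner for-loop over an even (outside-quotes) segment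
def procOut : List Char → Int → Int → List Char × Int × Int
  | [], p, b => ([], p, b)
  | c :: cs, p, b =>
    if c = '(' then
      let r := procOut cs (p + 1) b; (c :: r.1, r.2.1, r.2.2)
    else if c = ')' then
      (if p = 0 then procOut cs p b else
        let r := procOut cs (p - 1) b; (c :: r.1, r.2.1, r.2.2))
    else if c = '{' then
      let r := procOut cs p (b + 1); (c :: r.1, r.2.1, r.2.2)
    else if c = '}' then
      (if b = 0 then procOut cs p b else
        let r := procOut cs p (b - 1); (c :: r.1, r.2.1, r.2.2))
    else
      let r := procOut cs p b; (c :: r.1, r.2.1, r.2.2)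

-- B's while-loop: consume two segments at a time (even processed, odd verbatim)
def procParts : List (List Char) → Int → Int → List (List Char) × Int × Int
  | [], p, b => ([], p, b)
  | [s], p, b =>
    let r := procOut s p b; ([r.1], r.2.1, r.2.2)
  | s :: t :: rest, p, b =>
    let r := procOut s p b
    let q := procParts rest r.2.1 r.2.2
    (r.1 :: t :: q.1, q.2.1, q.2.2)

-- '"'.join(parts)  (')' * p and '}' * b are List.replicate; Python's * on a negative count gives '', as toNat does)
def joinQ : List (List Char) → List Char
  | [] => []
  | [s] => s
  | s :: t :: rest => s ++ '"' :: joinQ (t :: rest)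

def balance_delimiters_py_alt (text : String) : String :=
  let q := procParts (splitQ text.toList) 0 0
  String.mk (joinQ q.1 ++ List.replicate q.2.1.toNat ')' ++ List.replicate q.2.2.toNat '}')

-- ===== PRECONDITION & SPEC =====
def Spec_balance_delimiters_py (text : String) (out : String) : Prop := out = balance_delimiters_py_alt text
instance (text : String) (out : String) : Decidable (Spec_balance_delimiters_py text out) := by unfold Spec_balance_delimiters_py; infer_instance

-- ===== CLAIM (what is proved, stated in full; the proofs are below) =====
def Claim_equal_balance_delimiters_py : Prop := ∀ (text : String), Dom_balance_delimiters_py text → Spec_balance_delimiters_py text (balance_delimiters_py text)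

-- ===== LEMMAS AND PROOFS =====

theorem stepA_quote (res : List Char) (p b : Int) (ins : Bool) :
    stepA (res, p, b, ins) '"' = (res ++ ['"'], p, b, !ins) := by
  simp [stepA]

-- A's loop on a quote-free stretch while inside a string copies it verbatim
theorem foldl_in (s : List Char) (h : '"' ∉ s) (res : List Char) (p b : Int) :
    List.foldl stepA (res, p, b, true) s = (res ++ s, p, b, true) := by
  induction s generalizing res with
  | nil => simp
  | cons c cs ih =>
    have hc : c ≠ '"' := fun hc => h (hc ▸ List.mem_cons_self)
    have hcs : '"' ∉ cs := fun hm => h (List.mem_cons_of_mem _ hm)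
    simp [stepA, hc, ih hcs]

-- A's loop on a quote-free stretch while outside a string acts as procOut
theorem foldl_out (s : List Char) (h : '"' ∉ s) (res : List Char) (p b : Int) :
    List.foldl stepA (res, p, b, false) s =
      (res ++ (procOut s p b).1, (procOut s p b).2.1, (procOut s p b).2.2, false) := by
  induction s generalizing res p b with
  | nil => simp [procOut]
  | cons c cs ih =>
    have hc : c ≠ '"' := fun hc => h (hc ▸ List.mem_cons_self)
    have hcs : '"' ∉ cs := fun hm => h (List.mem_cons_of_mem _ hm)
    by_cases h1 : c = '('
    · simp [stepA, procOut, hc, h1, ih hcs]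
    · by_cases h2 : c = ')'
      · by_cases hp : p = 0
        · simp [stepA, procOut, hc, h1, h2, hp, ih hcs]
        · simp [stepA, procOut, hc, h1, h2, hp, ih hcs]
      · by_cases h3 : c = '{'
        · simp [stepA, procOut, hc, h1, h2, h3, ih hcs]
        · by_cases h4 : c = '}'
          · by_cases hb : b = 0
            · simp [stepA, procOut, hc, h1, h2, h3, h4, hb, ih hcs]
            · simp [stepA, procOut, hc, h1, h2, h3, h4, hb, ih hcs]
          · simp [stepA, procOut, hc, h1, h2, h3, h4, ih hcs]

theorem splitQ_ne_nil (l : List Char) : splitQ l ≠ [] := by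
  cases l with
  | nil => simp [splitQ]
  | cons c cs =>
    simp only [splitQ]
    split
    · simp
    · cases h : splitQ cs <;> simp

theorem joinQ_splitQ (l : List Char) : joinQ (splitQ l) = l := by
  induction l with
  | nil => simp [splitQ, joinQ]
  | cons c cs ih =>
    by_cases hc : c = '"'
    · cases h : splitQ cs with
      | nil => exact absurd h (splitQ_ne_nil cs)
      | cons s ss =>
        rw [show splitQ (c :: cs) = [] :: splitQ cs by simp [splitQ, hc], h,
            show joinQ ([] :: s :: ss) = '"' :: joinQ (s :: ss) by simp [joinQ],
            ← h, ih, hc]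
    · simp only [splitQ, hc, if_neg hc]
      cases h : splitQ cs with
      | nil => exact absurd h (splitQ_ne_nil cs)
      | cons s ss =>
        cases ss with
        | nil => rw [← ih, h]; simp [joinQ]
        | cons t ts => rw [← ih, h]; simp [joinQ]

theorem splitQ_no_quote (l : List Char) : ∀ s ∈ splitQ l, '"' ∉ s := by
  induction l with
  | nil => simp [splitQ]
  | cons c cs ih =>
    by_cases hc : c = '"'
    · simp only [splitQ, hc, if_pos rfl]
      intro s hs
      rcases List.mem_cons.1 hs with h | h
      · simp [h]
      · exact ih s h
    · simp only [splitQ, if_neg hc]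
      cases h : splitQ cs with
      | nil => exact absurd h (splitQ_ne_nil cs)
      | cons t ts =>
        intro s hs
        rcases List.mem_cons.1 hs with rfl | hmem
        · intro hm
          rcases List.mem_cons.1 hm with h' | h'
          · exact hc h'.symm
          · exact ih t (h ▸ List.mem_cons_self) h'
        · exact ih s (h ▸ List.mem_cons_of_mem _ hmem)

theorem procParts_ne_nil (segs : List (List Char)) (hne : segs ≠ []) (p b : Int) :
    (procParts segs p b).1 ≠ [] := by
  match segs with
  | [] => exact absurd rfl hne
  | [s] => simp [procParts]
  | s :: t :: rest => simp [procParts]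

-- main decomposition lemma: A's flagged fold over the rejoined segments equals B's two-at-a-time pass
theorem foldl_joinQ (segs : List (List Char)) (p b : Int)
    (h : ∀ s ∈ segs, '"' ∉ s) : ∀ res : List Char,
    List.foldl stepA (res, p, b, false) (joinQ segs) =
      ((res ++ joinQ (procParts segs p b).1, (procParts segs p b).2.1,
        (procParts segs p b).2.2,
        (List.foldl stepA (res, p, b, false) (joinQ segs)).2.2.2)) := by
  induction segs, p, b using procParts.induct with
  | case1 p b => intro res; simp [joinQ, procParts]
  | case2 s p b =>
    intro res
    simp only [joinQ, procParts]
    rw [foldl_out s (h s List.mem_cons_self)]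
  | case3 s t rest p b _r ih =>
    intro res
    simp only [_r] at ih
    have hs : '"' ∉ s := h s List.mem_cons_self
    have ht : '"' ∉ t := h t (List.mem_cons_of_mem _ List.mem_cons_self)
    have hrest : ∀ x ∈ rest, '"' ∉ x := fun x hx =>
      h x (List.mem_cons_of_mem _ (List.mem_cons_of_mem _ hx))
    cases rest with
    | nil =>
      simp only [joinQ, procParts]
      rw [show (s ++ '"' :: t : List Char) = s ++ ['"'] ++ t by simp,
          List.foldl_append, List.foldl_append, foldl_out s hs]
      simp only [List.foldl_cons, List.foldl_nil, stepA_quote, Bool.not_false]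
      rw [foldl_in t ht]
      simp [procParts, joinQ]
    | cons r rs =>
      simp only [joinQ, procParts]
      rw [show (s ++ '"' :: (t ++ '"' :: joinQ (r :: rs)) : List Char)
            = s ++ ['"'] ++ t ++ ['"'] ++ joinQ (r :: rs) by simp,
          List.foldl_append, List.foldl_append, List.foldl_append, List.foldl_append,
          foldl_out s hs]
      simp only [List.foldl_cons, List.foldl_nil, stepA_quote, Bool.not_false]
      rw [foldl_in t ht]
      simp only [stepA_quote, Bool.not_true, Bool.not_not]
      rw [ih hrest]
      cases hq : (procParts (r :: rs) (procOut s p b).2.1 (procOut s p b).2.2).1 with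
      | nil => exact absurd hq (procParts_ne_nil _ (by simp) _ _)
      | cons x xs => simp [joinQ, hq]

-- ===== VERDICT (by name: the statement is the Claim_ definition above) =====
theorem balance_delimiters_py_spec : Claim_equal_balance_delimiters_py := by
  intro text _
  unfold Spec_balance_delimiters_py balance_delimiters_py balance_delimiters_py_alt
  have h := foldl_joinQ (splitQ text.toList) 0 0 (splitQ_no_quote text.toList) []
  rw [joinQ_splitQ] at h
  rw [h]
  have hrep : ∀ (n : Int) (c : Char),
      (if n > 0 then List.replicate n.toNat c else []) = List.replicate n.toNat c := by
    intro n c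
    split_ifs with hn
    · rfl
    · have h0 : n.toNat = 0 := by omega
      simp [h0]
  simp [hrep]
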